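-- pv_equiv track=rewrite | github.com/kedro-org/kedro | kedro/framework/cli/starters.py | _convert_tool_short_names_to_numbers
-- ===== SOURCE A (Python) =====
-- TOOLS_SHORTNAME_TO_NUMBER = {
--     "lint": "1",
--     "test": "2",
--     "tests": "2",
--     "log": "3",
--     "logs": "3",
--     "docs": "4",
--     "doc": "4",
--     "data": "5",
--     "pyspark": "6",
-- }
--
-- NUMBER_TO_TOOLS_NAME = {
--     "1": "Linting",
--     "2": "Testing",
--     "3": "Custom Logging",
--     "4": "Documentation",
--     "5": "Data Structure",
--     "6": "PySpark",
-- }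
--
-- def _convert_tool_short_names_to_numbers(selected_tools: str) -> list:
--     """Prepares tools selection from the CLI or config input to the correct format
--     to be put in the project configuration, if it exists.
--     Replaces tool strings with the corresponding prompt number.
--
--     Args:
--         selected_tools: a string containing the value for the --tools flag or config file,
--             or None in case none were provided, i.e. lint,docs.
--
--     Returns:
--         String with the numbers corresponding to the desired tools, or
--         None in case the --tools flag was not used.
--     """
--     if selected_tools.lower() == "none":
--         return []
--     if selected_tools.lower() == "all":
--         return list(NUMBER_TO_TOOLS_NAME.keys())
--
--     tools = []
--     for tool in selected_tools.lower().split(","):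
--         tool_short_name = tool.strip()
--         if tool_short_name in TOOLS_SHORTNAME_TO_NUMBER:
--             tools.append(TOOLS_SHORTNAME_TO_NUMBER[tool_short_name])
--
--     # Remove duplicates if any
--     tools = sorted(list(set(tools)))
--
--     return tools
-- ===== SOURCE B (Python) =====
-- TOOLS_SHORTNAME_TO_NUMBER = {
--     "lint": "1",
--     "test": "2",
--     "tests": "2",
--     "log": "3",
--     "logs": "3",
--     "docs": "4",
--     "doc": "4",
--     "data": "5",
--     "pyspark": "6",
-- }
--
-- NUMBER_TO_TOOLS_NAME = {
--     "1": "Linting",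
--     "2": "Testing",
--     "3": "Custom Logging",
--     "4": "Documentation",
--     "5": "Data Structure",
--     "6": "PySpark",
-- }
--
-- # Inverted index: each prompt number with the short names that select it.
-- NUMBER_TO_SHORT_NAMES = {
--     "1": ("lint",),
--     "2": ("test", "tests"),
--     "3": ("log", "logs"),
--     "4": ("docs", "doc"),
--     "5": ("data",),
--     "6": ("pyspark",),
-- }
--
-- def _convert_tool_short_names_to_numbers(selected_tools: str) -> list:
--     lowered = selected_tools.lower()
--     if lowered == "none":
--         return []
--     if lowered == "all":
--         return list(NUMBER_TO_TOOLS_NAME)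
--
--     tokens = {tool.strip() for tool in lowered.split(",")}
--     return [
--         number
--         for number, short_names in NUMBER_TO_SHORT_NAMES.items()
--         if any(name in tokens for name in short_names)
--     ]
-- ===== Notes on version B (the rewrite author's own statement) =====
-- stated objective: alternative
-- what changed: B inverts the join: instead of scanning tokens, looking each up in the shortname table and then deduplicating and sorting the hits, it builds the token set once and emits the result by scanning a fixed inverted table number->shortnames in order, keeping each number whose shortnames intersect the token set.
import Mathlib
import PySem

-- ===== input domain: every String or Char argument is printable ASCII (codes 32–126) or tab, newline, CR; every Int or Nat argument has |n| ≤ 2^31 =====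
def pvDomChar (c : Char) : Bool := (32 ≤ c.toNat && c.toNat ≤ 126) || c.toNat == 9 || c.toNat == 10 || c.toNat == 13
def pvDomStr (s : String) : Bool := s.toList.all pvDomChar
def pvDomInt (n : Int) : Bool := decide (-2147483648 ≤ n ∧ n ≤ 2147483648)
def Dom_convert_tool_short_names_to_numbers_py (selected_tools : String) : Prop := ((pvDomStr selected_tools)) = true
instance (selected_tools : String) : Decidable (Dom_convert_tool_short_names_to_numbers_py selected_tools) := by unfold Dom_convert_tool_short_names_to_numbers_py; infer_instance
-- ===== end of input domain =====

-- B inverts the join: it builds the token set once and scans a fixed inverted table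
-- number -> shortnames in order, keeping each number whose shortnames intersect the token
-- set — no per-token lookup list, no dedup, no sort (objective: alternative).

-- module constants (shared by both Pythons)
def pvToolsShortnameToNumber : PySem.Dict String String :=
  PySem.Dict.ofList [("lint","1"),("test","2"),("tests","2"),("log","3"),("logs","3"),
                     ("docs","4"),("doc","4"),("data","5"),("pyspark","6")]

def pvNumberToToolsName : PySem.Dict String String :=
  PySem.Dict.ofList [("1","Linting"),("2","Testing"),("3","Custom Logging"),
                     ("4","Documentation"),("5","Data Structure"),("6","PySpark")]

-- ===== PORT A =====
-- s.split(",") with the non-empty literal separator never raises: split? is always `some`, so `.getD []` is exact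
def convert_tool_short_names_to_numbers_py (selected_tools : String) : List String :=
  if PySem.Str.lower selected_tools = "none" then []
  else if PySem.Str.lower selected_tools = "all" then PySem.Dict.keys pvNumberToToolsName
  else
    let tools := ((PySem.Str.split? (PySem.Str.lower selected_tools) ",").getD []).foldl
      (fun acc tool =>
        let tool_short_name := PySem.Str.strip tool
        if PySem.Dict.contains pvToolsShortnameToNumber tool_short_name then
          acc ++ [PySem.Dict.getD pvToolsShortnameToNumber tool_short_name ""]
        else acc) []
    PySem.List.sorted (PySem.Set.ofList tools) (fun x => x) false

-- ===== PORT B =====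
-- B-only constant: the inverted index number -> shortnames (a module literal in Source B)
def pvNumberShortNames : List (String × List String) :=
  [("1",["lint"]),("2",["test","tests"]),("3",["log","logs"]),
   ("4",["docs","doc"]),("5",["data"]),("6",["pyspark"])]

def convert_tool_short_names_to_numbers_py_alt (selected_tools : String) : List String :=
  let lowered := PySem.Str.lower selected_tools
  if lowered = "none" then []
  else if lowered = "all" then PySem.Dict.keys pvNumberToToolsName
  else
    let tokens := PySem.Set.ofList
      (((PySem.Str.split? lowered ",").getD []).map PySem.Str.strip)
    (pvNumberShortNames.filter
      (fun p => p.2.any (fun name => PySem.Set.contains tokens name))).map Prod.fst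

-- ===== PRECONDITION & SPEC =====
def Spec_convert_tool_short_names_to_numbers_py (selected_tools : String) (out : List String) : Prop := out = convert_tool_short_names_to_numbers_py_alt selected_tools
instance (selected_tools : String) (out : List String) : Decidable (Spec_convert_tool_short_names_to_numbers_py selected_tools out) := by unfold Spec_convert_tool_short_names_to_numbers_py; infer_instance

-- ===== CLAIM (what is proved, stated in full; the proofs are below) =====
def Claim_equal_convert_tool_short_names_to_numbers_py : Prop := ∀ (selected_tools : String), Dom_convert_tool_short_names_to_numbers_py selected_tools → Spec_convert_tool_short_names_to_numbers_py selected_tools (convert_tool_short_names_to_numbers_py selected_tools)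

-- ===== LEMMAS AND PROOFS =====

-- the per-token test and lookup A performs
def pvP (tool : String) : Bool := PySem.Dict.contains pvToolsShortnameToNumber (PySem.Str.strip tool)
def pvF (tool : String) : String := PySem.Dict.getD pvToolsShortnameToNumber (PySem.Str.strip tool) ""

-- characterisation of the two tables against each other: a string is a shortname of
-- number n (per the inverted index) iff the shortname table contains it and maps it to n
theorem pv_key (s n : String) (names : List String)
    (h : (n, names) ∈ pvNumberShortNames) :
    s ∈ names ↔ (PySem.Dict.contains pvToolsShortnameToNumber s = true ∧
                 PySem.Dict.getD pvToolsShortnameToNumber s "" = n) := by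
  rw [show pvNumberShortNames
      = [("1",["lint"]),("2",["test","tests"]),("3",["log","logs"]),
         ("4",["docs","doc"]),("5",["data"]),("6",["pyspark"])] from rfl] at h
  constructor
  · intro hmem
    fin_cases h <;> simp only [List.mem_cons, List.not_mem_nil, or_false] at hmem <;>
      rcases hmem with rfl | rfl <;> exact ⟨by decide, by decide⟩
  · rintro ⟨hc, hd⟩
    have hk : s ∈ PySem.Dict.keys pvToolsShortnameToNumber :=
      (PySem.Dict.contains_iff_mem_keys _ _).mp hc
    rw [show PySem.Dict.keys pvToolsShortnameToNumber
        = ["lint","test","tests","log","logs","docs","doc","data","pyspark"] from rfl] at hk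
    fin_cases hk <;> fin_cases h <;>
      first
        | decide
        | exact absurd hd (by decide)

-- the six number keys are strictly increasing
theorem pv_U_pairwise_lt :
    List.Pairwise (fun a b => a < b) (["1","2","3","4","5","6"] : List String) := by
  norm_num [List.pairwise_cons, String.lt_iff_toList_lt]
  decide

-- every value the short-name table can return is one of the six number keys
theorem pv_getD_mem_keys (name : String)
    (h : PySem.Dict.contains pvToolsShortnameToNumber name = true) :
    PySem.Dict.getD pvToolsShortnameToNumber name "" ∈ ["1","2","3","4","5","6"] := by
  rw [PySem.Dict.contains_iff_mem_keys,
      show PySem.Dict.keys pvToolsShortnameToNumber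
        = ["lint","test","tests","log","logs","docs","doc","data","pyspark"] from rfl] at h
  fin_cases h <;> decide

-- sorted(set(L)) = the ordered universe filtered by membership, when L ⊆ universe
theorem pv_sorted_ofList_eq_filter (L : List String)
    (hsub : ∀ x ∈ L, x ∈ ["1","2","3","4","5","6"]) :
    PySem.List.sorted (PySem.Set.ofList L) (fun x => x) false
      = (["1","2","3","4","5","6"] : List String).filter
          (fun n => PySem.Set.contains (PySem.Set.ofList L) n) := by
  apply PySem.List.sorted_eq_of_perm_of_pairwise_lt
  · rw [List.perm_ext_iff_of_nodup (List.Nodup.filter _ (by decide))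
        (PySem.Set.nodup_ofList L)]
    intro x
    simp only [List.mem_filter, PySem.Set.contains_iff, PySem.Set.mem_ofList]
    exact ⟨fun h => h.2, fun h => ⟨hsub x h, h⟩⟩
  · exact List.Pairwise.filter _ pv_U_pairwise_lt

-- mapping fst over a pair-filter whose test agrees with q on fst
theorem pv_map_fst_filter {q : String → Bool} (c : String → Bool)
    (ps : List (String × List String))
    (h : ∀ p ∈ ps, (p.2.any c) = q p.1) :
    (ps.filter (fun p => p.2.any c)).map Prod.fst = (ps.map Prod.fst).filter q := by
  induction ps with
  | nil => rfl
  | cons a t ih =>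
    have ha := h a (List.mem_cons_self)
    have ht := ih (fun p hp => h p (List.mem_cons_of_mem _ hp))
    by_cases hq : q a.1 = true <;>
      simp [ha, hq, ht]

-- ===== VERDICT (by name: the statement is the Claim_ definition above) =====
theorem convert_tool_short_names_to_numbers_py_spec : Claim_equal_convert_tool_short_names_to_numbers_py := by
  intro s _
  unfold Spec_convert_tool_short_names_to_numbers_py
  unfold convert_tool_short_names_to_numbers_py convert_tool_short_names_to_numbers_py_alt
  by_cases h1 : PySem.Str.lower s = "none"
  · simp [h1]
  by_cases h2 : PySem.Str.lower s = "all"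
  · simp [h2]
  simp only [h1, h2, if_false]
  set tl := (PySem.Str.split? (PySem.Str.lower s) ",").getD [] with htl
  -- zeta/beta-reduce A's loop body (definitional)
  change PySem.List.sorted
      (PySem.Set.ofList (tl.foldl
        (fun acc tool => if pvP tool then acc ++ [pvF tool] else acc) []))
      (fun x => x) false
    = (pvNumberShortNames.filter
        (fun p => p.2.any (fun name =>
          PySem.Set.contains (PySem.Set.ofList (tl.map PySem.Str.strip)) name))).map Prod.fst
  rw [PySem.List.foldl_append_if]
  simp only [List.nil_append]
  -- A-side: sorted set = ordered filter of the universe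
  rw [pv_sorted_ofList_eq_filter ((tl.filter pvP).map pvF)
        (by intro x hx
            simp only [List.mem_map, List.mem_filter] at hx
            obtain ⟨tok, ⟨_, hp⟩, rfl⟩ := hx
            exact pv_getD_mem_keys _ hp)]
  -- B-side: pair-filter then fst = universe filtered by the same predicate
  rw [pv_map_fst_filter (q := fun n =>
        PySem.Set.contains (PySem.Set.ofList ((tl.filter pvP).map pvF)) n)
      _ pvNumberShortNames ?_]
  · rfl
  · intro p hp
    rcases p with ⟨n, names⟩
    simp only
    rw [Bool.eq_iff_iff]
    simp only [List.any_eq_true, PySem.Set.contains_iff, PySem.Set.mem_ofList,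
               List.mem_map, List.mem_filter]
    constructor
    · rintro ⟨name, hname, tok, htok, rfl⟩
      have := (pv_key (PySem.Str.strip tok) n names hp).mp hname
      exact ⟨tok, ⟨htok, this.1⟩, this.2⟩
    · rintro ⟨tok, ⟨htok, hptok⟩, hf⟩
      exact ⟨PySem.Str.strip tok, (pv_key _ n names hp).mpr ⟨hptok, hf⟩, tok, htok, rfl⟩
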